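-- pv_equiv track=rewrite | github.com/Biomedical-Imaging-Group/psf_generator | src/pupil.py | index_to_nl
-- ===== SOURCE A (Python) =====
-- def index_to_nl(index):
--     n = 0
--     while True:
--         for l in range(n + 1):
--             if n*(n+1)/2 + l == index:
--                 return (n, -n+2*l)
--             elif n*(n+1)/2 + l > index:
--                 raise ValueError('Index out of bounds.')
--         n += 1
-- ===== SOURCE B (Python) =====
-- import math
--
-- def index_to_nl(index):
--     n = (math.isqrt(8 * index + 1) - 1) // 2
--     l = index - n * (n + 1) // 2
--     return (n, -n + 2 * l)
-- ===== Notes on version B (the rewrite author's own statement) =====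
-- stated objective: faster
-- what changed: Replaced the unbounded search over n (with an inner scan over l) by the closed form n = (isqrt(8*index+1)-1)//2, l = index - n(n+1)/2.
import Mathlib
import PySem

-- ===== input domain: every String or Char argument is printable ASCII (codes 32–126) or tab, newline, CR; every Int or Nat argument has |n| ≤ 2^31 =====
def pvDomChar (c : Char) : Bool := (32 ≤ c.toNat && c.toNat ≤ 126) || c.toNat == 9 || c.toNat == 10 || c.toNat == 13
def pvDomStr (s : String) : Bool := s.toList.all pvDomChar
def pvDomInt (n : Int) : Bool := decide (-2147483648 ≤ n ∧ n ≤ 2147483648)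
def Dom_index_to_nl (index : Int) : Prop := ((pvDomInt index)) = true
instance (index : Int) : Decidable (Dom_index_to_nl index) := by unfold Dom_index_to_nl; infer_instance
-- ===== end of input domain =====

-- B replaces A's linear search for the triangular row by the O(1) closed form via integer sqrt.
-- Both raise ValueError on negative index, so Pre_ is 0 ≤ index.

-- ===== PORT A =====
-- inner 'for l in range(n + 1)' loop: counts down the remaining iterations; 'some []' stands
-- for the 'raise' branch, which is unreachable for index ≥ 0 (outside Pre_ nothing is claimed).
-- 'n*(n+1)/2' is exact in Python floats on Dom and n*(n+1) is even, so integer '/' is exact here.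
def indexForLoop (index n l : Int) : Nat → Option (List Int)
  | 0 => none
  | c + 1 =>
    if n * (n + 1) / 2 + l = index then some [n, -n + 2 * l]
    else if n * (n + 1) / 2 + l > index then some []
    else indexForLoop index n (l + 1) c

-- the 'while True' loop over n; fuel index.toNat + 1 suffices (n never exceeds index for index ≥ 0)
def indexWhileLoop (index n : Int) : Nat → List Int
  | 0 => []
  | fuel + 1 =>
    match indexForLoop index n 0 (n.toNat + 1) with
    | some r => r
    | none => indexWhileLoop index (n + 1) fuel

def index_to_nl (index : Int) : List Int :=
  indexWhileLoop index 0 (index.toNat + 1)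

-- ===== PORT B =====
def index_to_nl_alt (index : Int) : List Int :=
  let n : Int := PySem.Int.floordiv ((Nat.sqrt (8 * index + 1).toNat : Int) - 1) 2
  let l : Int := index - PySem.Int.floordiv (n * (n + 1)) 2
  [n, -n + 2 * l]

-- ===== PRECONDITION & SPEC =====
-- A raises ValueError for index < 0 (and B raises too): those inputs are excluded.
def Pre_index_to_nl (index : Int) : Prop := 0 ≤ index
instance (index : Int) : Decidable (Pre_index_to_nl index) := by unfold Pre_index_to_nl; infer_instance
def pvWitness_index_to_nl : Int := (7)

def Spec_index_to_nl (index : Int) (out : List Int) : Prop := out = index_to_nl_alt index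
instance (index : Int) (out : List Int) : Decidable (Spec_index_to_nl index out) := by unfold Spec_index_to_nl; infer_instance

-- ===== CLAIM (what is proved, stated in full; the proofs are below) =====
def Claim_equal_index_to_nl : Prop := ∀ (index : Int), Dom_index_to_nl index → Pre_index_to_nl index → Spec_index_to_nl index (index_to_nl index)

-- ===== LEMMAS AND PROOFS =====

-- abstract version of the inner loop: the triangular number t = n*(n+1)/2 is a free variable,
-- so that omega can reason about the comparisons linearly
def forLoopT (index n t l : Int) : Nat → Option (List Int)
  | 0 => none
  | c + 1 =>
    if t + l = index then some [n, -n + 2 * l]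
    else if t + l > index then some []
    else forLoopT index n t (l + 1) c

theorem indexForLoop_eq_T (index n : Int) (l : Int) (c : Nat) :
    indexForLoop index n l c = forLoopT index n (n * (n + 1) / 2) l c := by
  induction c generalizing l with
  | zero => rfl
  | succ c ih => simp only [indexForLoop, forLoopT, ih]

theorem forLoopT_hit (index n t : Int) (c : Nat) (l : Int)
    (h1 : l ≤ index - t) (h2 : index - t < l + c) :
    forLoopT index n t l c = some [n, -n + 2 * (index - t)] := by
  induction c generalizing l with
  | zero => omega
  | succ c ih =>
    simp only [forLoopT]
    split_ifs with he hg
    · have : l = index - t := by omega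
      simp [this]
    · omega
    · exact ih (l + 1) (by omega) (by omega)

theorem forLoopT_miss (index n t : Int) (c : Nat) (l : Int)
    (h : t + l + c ≤ index) :
    forLoopT index n t l c = none := by
  induction c generalizing l with
  | zero => rfl
  | succ c ih =>
    simp only [forLoopT]
    split_ifs with he hg
    · omega
    · omega
    · exact ih (l + 1) (by omega)

-- triangular numbers as exact halves: n*(n+1) is even
theorem half_double (a : Int) (h : 2 ∣ a) : 2 * (a / 2) = a := Int.mul_ediv_cancel' h

theorem tri_dvd (n : Int) : (2 : Int) ∣ n * (n + 1) := by
  rcases Int.even_or_odd n with ⟨k, hk⟩ | ⟨k, hk⟩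
  · exact ⟨k * (n + 1), by rw [hk]; ring⟩
  · exact ⟨n * (k + 1), by rw [hk]; ring⟩

theorem tri_double (n : Int) : 2 * (n * (n + 1) / 2) = n * (n + 1) :=
  half_double _ (tri_dvd n)

-- the while loop returns the (N, l) row once n ≤ N < n + fuel and T(N) ≤ index < T(N+1)
theorem indexWhileLoop_eq (index N : Int) (hN : 0 ≤ N)
    (hlo : N * (N + 1) / 2 ≤ index) (hhi : index < (N + 1) * (N + 2) / 2) :
    ∀ (fuel : Nat) (n : Int), 0 ≤ n → n ≤ N → N < n + fuel →
    indexWhileLoop index n fuel = [N, -N + 2 * (index - N * (N + 1) / 2)] := by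
  intro fuel
  induction fuel with
  | zero => intro n _ _ h; omega
  | succ fuel ih =>
    intro n hn hnN hfuel
    simp only [indexWhileLoop, indexForLoop_eq_T]
    by_cases hcase : n = N
    · subst hcase
      have hT2 := tri_double n
      have hT2' : 2 * ((n + 1) * (n + 2) / 2) = (n + 1) * (n + 2) :=
        half_double _ (by rw [show (n + 1) * (n + 2) = (n + 1) * ((n + 1) + 1) from by ring]; exact tri_dvd (n + 1))
      have hring : (n + 1) * (n + 2) = n * (n + 1) + 2 * (n + 1) := by ring
      rw [forLoopT_hit index n (n * (n + 1) / 2) (n.toNat + 1) 0 (by omega) (by omega)]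
    · -- n < N : inner loop exhausts (T(n) + n + 1 = T(n+1) ≤ T(N) ≤ index), recurse
      have hnN' : n + 1 ≤ N := by omega
      have hmono : (n + 1) * (n + 2) ≤ N * (N + 1) := by nlinarith
      have hT2 := tri_double n
      have hT2' : 2 * ((n + 1) * (n + 2) / 2) = (n + 1) * (n + 2) :=
        half_double _ (by rw [show (n + 1) * (n + 2) = (n + 1) * ((n + 1) + 1) from by ring]; exact tri_dvd (n + 1))
      have hT2N := tri_double N
      have hring : (n + 1) * (n + 2) = n * (n + 1) + 2 * (n + 1) := by ring
      rw [forLoopT_miss index n (n * (n + 1) / 2) (n.toNat + 1) 0 (by omega)]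
      exact ih (n + 1) (by omega) hnN' (by omega)

-- B's output characterised: its n is exactly the triangular root
theorem alt_char (index : Int) (hx : 0 ≤ index) :
    ∃ N : Int, index_to_nl_alt index = [N, -N + 2 * (index - N * (N + 1) / 2)] ∧
      0 ≤ N ∧ N * (N + 1) / 2 ≤ index ∧ index < (N + 1) * (N + 2) / 2 := by
  refine ⟨((Nat.sqrt (8 * index + 1).toNat : Int) - 1) / 2, ?_, ?_⟩
  · simp only [index_to_nl_alt,
      PySem.Int.floordiv_eq_ediv_of_pos (show (0 : Int) < 2 by norm_num)]
  · set N : Int := ((Nat.sqrt (8 * index + 1).toNat : Int) - 1) / 2 with hNform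
    set m : Nat := (8 * index + 1).toNat with hm
    set s : Nat := Nat.sqrt m with hs
    have hmInt : (m : Int) = 8 * index + 1 := by omega
    have hsq : (s : Int) * s ≤ (m : Int) := by
      have h := Nat.sqrt_le' m; rw [pow_two] at h; exact_mod_cast h
    have hsq' : (m : Int) < ((s : Int) + 1) * ((s : Int) + 1) := by
      have h := Nat.lt_succ_sqrt' m; rw [pow_two] at h; exact_mod_cast h
    have hs1 : 1 ≤ (s : Int) := by
      by_contra h
      have h0 : s = 0 := by omega
      rw [h0] at hsq'
      push_cast at hsq'
      omega
    have hNlo : 2 * N ≤ (s : Int) - 1 := by rw [hNform]; omega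
    have hNhi : (s : Int) - 1 ≤ 2 * N + 1 := by rw [hNform]; omega
    have hN0 : 0 ≤ N := by rw [hNform]; omega
    refine ⟨hN0, ?_, ?_⟩
    · -- (2N+1)^2 ≤ s^2 ≤ m = 8*index+1
      have h1 : (2 * N + 1) * (2 * N + 1) ≤ (s : Int) * s := by nlinarith
      have hT2 := tri_double N
      nlinarith
    · -- m ≤ (s+1)^2 - 1 ≤ (2N+3)^2 - 1 = 4(N+1)(N+2)
      have h1 : ((s : Int) + 1) * ((s : Int) + 1) ≤ (2 * N + 3) * (2 * N + 3) := by nlinarith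
      have hT2 : 2 * ((N + 1) * (N + 2) / 2) = (N + 1) * (N + 2) :=
        half_double _ (by rw [show (N + 1) * (N + 2) = (N + 1) * ((N + 1) + 1) from by ring]; exact tri_dvd (N + 1))
      nlinarith

-- ===== VERDICT (by name: the statement is the Claim_ definition above) =====
theorem index_to_nl_spec : Claim_equal_index_to_nl := by
  intro index _ hpre
  unfold Spec_index_to_nl index_to_nl
  obtain ⟨N, halt, hN0, hlo, hhi⟩ := alt_char index hpre
  rw [halt]
  -- fuel suffices: N ≤ index (N ≤ N*(N+1)/2 ≤ index for N ≥ 1, trivial for N = 0)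
  have hNle : N ≤ index := by
    have hT2 := tri_double N
    nlinarith [sq_nonneg (N - 1)]
  exact indexWhileLoop_eq index N hN0 hlo hhi (index.toNat + 1) 0 le_rfl hN0 (by omega)
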